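-- pv_equiv track=rewrite | github.com/alexandraback/datacollection | solutions_5636311922769920_1/Python/jinhwanlazy/D.py | inflate
-- ===== SOURCE A (Python) =====
-- def inflate(seed, C):
--     prv, nxt = ['L'], []
--     for _ in range(C):
--         for i in prv:
--             if i == 'L':
--                 nxt += seed.copy()
--             else:
--                 nxt += ['G']*len(seed)
--         prv, nxt = nxt, []
--     return ''.join(prv)
-- ===== SOURCE B (Python) =====
-- def inflate(seed, C):
--     # Closed-form level builder: instead of rebuilding the element list level by
--     # level, build the result string bottom-up, reusing the previous level's
--     # string for each 'L' and a closed-form all-'G' block (length len(seed)**k)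
--     # for every other seed element.
--     if C <= 0:
--         return 'L'
--     res = ''.join(seed)
--     s = len(seed)
--     block = s
--     for _ in range(C - 1):
--         g = 'G' * block
--         res = ''.join(res if e == 'L' else g for e in seed)
--         block *= s
--     return res
-- ===== Notes on version B (the rewrite author's own statement) =====
-- stated objective: alternative
-- what changed: Instead of rebuilding the whole level as a list of one-character strings C times, B builds the level string bottom-up, reusing the previous level's string for each 'L' seed element and emitting a closed-form all-'G' block of length len(seed)**k for every other element.
import Mathlib
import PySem

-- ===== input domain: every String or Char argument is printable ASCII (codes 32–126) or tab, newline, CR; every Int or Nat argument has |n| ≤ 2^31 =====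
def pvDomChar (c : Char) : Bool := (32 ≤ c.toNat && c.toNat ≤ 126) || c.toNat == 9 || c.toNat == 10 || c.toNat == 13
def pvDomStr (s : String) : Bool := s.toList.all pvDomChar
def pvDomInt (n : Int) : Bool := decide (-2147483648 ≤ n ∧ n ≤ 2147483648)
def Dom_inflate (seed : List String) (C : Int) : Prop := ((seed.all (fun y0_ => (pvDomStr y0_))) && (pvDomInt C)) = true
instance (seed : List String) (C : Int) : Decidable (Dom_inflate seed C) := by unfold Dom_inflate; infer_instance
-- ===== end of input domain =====

-- B replaces A's level-by-level rebuilding of the element list with a bottom-up string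
-- builder that reuses the previous level's string for each 'L' and a closed-form
-- all-'G' block for every other seed element (alternative decomposition).


-- ===== PORT A =====
def inflate (seed : List String) (C : Int) : String :=
  -- prv, nxt = ['L'], []
  let init : List String × List String := (["L"], [])
  -- for _ in range(C): for i in prv: …; prv, nxt = nxt, []
  let p := (PySem.List.pyRange 0 C 1).foldl
    (fun (st : List String × List String) _ =>
      let nxt := st.1.foldl
        (fun nxt i =>
          if i == "L" then nxt ++ seed
          else nxt ++ PySem.List.pyRepeat ["G"] (PySem.List.len seed)) st.2
      (nxt, [])) init
  -- return ''.join(prv)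
  PySem.Str.join "" p.1

-- ===== PORT B =====
def inflate_alt (seed : List String) (C : Int) : String :=
  if C ≤ 0 then "L"
  else
    let res := PySem.Str.join "" seed
    let s : Int := PySem.List.len seed
    let p := (PySem.List.pyRange 0 (C - 1) 1).foldl
      (fun (st : String × Int) _ =>
        -- g = 'G' * block : repetition of a single char (exact; a nonpositive count gives "")
        let g : String := String.ofList (List.replicate st.2.toNat 'G')
        (PySem.Str.join "" (seed.map (fun e => if e == "L" then st.1 else g)), st.2 * s))
      (res, s)
    p.1

-- ===== PRECONDITION & SPEC =====
def Spec_inflate (seed : List String) (C : Int) (out : String) : Prop := out = inflate_alt seed C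
instance (seed : List String) (C : Int) (out : String) : Decidable (Spec_inflate seed C out) := by unfold Spec_inflate; infer_instance

-- ===== CLAIM (what is proved, stated in full; the proofs are below) =====
def Claim_equal_inflate : Prop := ∀ (seed : List String) (C : Int), Dom_inflate seed C → Spec_inflate seed C (inflate seed C)

-- ===== LEMMAS AND PROOFS =====

-- the per-element expansion rule of A's inner loop
def istep (seed : List String) (i : String) : List String :=
  if i == "L" then seed else List.replicate seed.length "G"

-- the level list A maintains: lvl 0 = ['L'], each level expands every element
def lvl (seed : List String) : Nat → List String
  | 0 => ["L"]
  | k + 1 => (lvl seed k).flatMap (istep seed)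

-- join with empty separator is flatten
theorem chars_join_nil : ∀ (l : List (List Char)), PySem.Chars.join [] l = l.flatten
  | [] => PySem.Chars.join_nil []
  | [p] => by simp [PySem.Chars.join_singleton]
  | p :: q :: rest => by
      rw [PySem.Chars.join_cons_cons, chars_join_nil (q :: rest)]
      simp

theorem toList_join_nil (parts : List String) :
    (PySem.Str.join "" parts).toList = (parts.map String.toList).flatten := by
  rw [PySem.Str.toList_join]
  have h : ("" : String).toList = [] := rfl
  rw [h, chars_join_nil]

theorem flatten_flatMap_eq {α β : Type} (l : List α) (g : α → List (List β)) :
    (l.flatMap g).flatten = (l.map (fun x => (g x).flatten)).flatten := by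
  induction l with
  | nil => simp
  | cons a t ih => simp [ih]

theorem flatten_replicate_singleton {β : Type} (n : Nat) (c : β) :
    (List.replicate n [c]).flatten = List.replicate n c := by
  induction n with
  | zero => simp
  | succ k ih => simp [List.replicate_succ, ih]

-- A's inner fold is a flatMap
theorem innerA (seed : List String) (l acc : List String) :
    l.foldl (fun nxt i =>
        if i == "L" then nxt ++ seed
        else nxt ++ PySem.List.pyRepeat ["G"] (PySem.List.len seed)) acc
      = acc ++ l.flatMap (istep seed) := by
  induction l generalizing acc with
  | nil => simp
  | cons a t ih =>
      rw [List.foldl_cons, ih, List.flatMap_cons]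
      by_cases h : a == "L" <;>
        simp [h, istep, PySem.List.pyRepeat_singleton, PySem.List.len]

-- A computes the joined level C.toNat
theorem keyA (seed : List String) (ns : List Int) : ∀ (k : Nat),
    (ns.foldl
      (fun (st : List String × List String) _ =>
        (st.1.foldl (fun nxt i =>
          if i == "L" then nxt ++ seed
          else nxt ++ PySem.List.pyRepeat ["G"] (PySem.List.len seed)) st.2, []))
      (lvl seed k, [])) = (lvl seed (k + ns.length), []) := by
  induction ns with
  | nil => intro k; simp
  | cons a t ih =>
      intro k
      rw [List.foldl_cons]
      have hstep : (lvl seed k).foldl (fun nxt i =>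
          if i == "L" then nxt ++ seed
          else nxt ++ PySem.List.pyRepeat ["G"] (PySem.List.len seed)) [] = lvl seed (k + 1) := by
        rw [innerA]
        simp [lvl]
      simp only [hstep]
      rw [ih (k + 1)]
      simp only [List.length_cons]
      rw [show k + 1 + t.length = k + (t.length + 1) from by omega]

theorem inflate_eq_lvl (seed : List String) (C : Int) :
    inflate seed C = PySem.Str.join "" (lvl seed C.toNat) := by
  simp only [inflate]
  rw [show (["L"], ([] : List String)) = (lvl seed 0, ([] : List String)) from by simp [lvl],
    keyA seed _ 0]
  congr 2
  simp [PySem.List.pyRange_one]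

-- istep on a non-'L' element and flatMap of an all-'G' block
theorem istep_G (seed : List String) : istep seed "G" = List.replicate seed.length "G" := by
  simp [istep]

theorem flatMap_replicate_G (seed : List String) (m : Nat) :
    (List.replicate m "G").flatMap (istep seed) = List.replicate (m * seed.length) "G" := by
  induction m with
  | zero => simp
  | succ k ih =>
      rw [List.replicate_succ, List.flatMap_cons, ih, istep_G, Nat.succ_mul, Nat.add_comm]
      exact (List.replicate_add _ _ _).symm

theorem lvl_one (seed : List String) : lvl seed 1 = seed := by
  simp [lvl, istep]

theorem lvl_succ (seed : List String) (k : Nat) :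
    (lvl seed k).flatMap (istep seed) = lvl seed (k + 1) := rfl

-- the self-similar structure of levels >= 2
theorem lvl_succ_succ (seed : List String) (k : Nat) :
    lvl seed (k + 2) = seed.flatMap
      (fun e => if e == "L" then lvl seed (k + 1)
                else List.replicate (seed.length ^ (k + 1)) "G") := by
  induction k with
  | zero =>
      show (lvl seed 1).flatMap (istep seed) = _
      rw [lvl_one]
      have hf : istep seed = (fun e => if e == "L" then lvl seed 1
          else List.replicate (seed.length ^ 1) "G") := by
        funext e
        by_cases h : e == "L" <;> simp [istep, h, lvl_one]
      rw [hf]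
      simp [lvl_one]
  | succ m ih =>
      show (lvl seed (m + 2)).flatMap (istep seed) = _
      conv_lhs => rw [ih]
      rw [List.flatMap_assoc]
      congr 1
      funext e
      by_cases h : e == "L"
      · rw [if_pos h, if_pos h]
        exact lvl_succ seed (m + 1)
      · rw [if_neg h, if_neg h, flatMap_replicate_G, ← pow_succ]

-- one iteration of B's loop advances the invariant one level
theorem stepB_eq (seed : List String) (k : Nat) :
    PySem.Str.join "" (seed.map (fun e => if e == "L" then PySem.Str.join "" (lvl seed (k + 1))
        else String.ofList (List.replicate (((seed.length : Int)) ^ (k + 1)).toNat 'G')))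
      = PySem.Str.join "" (lvl seed (k + 2)) := by
  apply String.toList_inj.mp
  rw [toList_join_nil, toList_join_nil, lvl_succ_succ, List.map_flatMap,
    flatten_flatMap_eq]
  congr 1
  rw [List.map_map]
  apply List.map_congr_left
  intro e _
  by_cases h : e == "L"
  · rw [Function.comp_apply, if_pos h, if_pos h, toList_join_nil]
  · rw [Function.comp_apply, if_neg h, if_neg h, String.toList_ofList,
      List.map_replicate, show "G".toList = ['G'] from rfl, flatten_replicate_singleton]
    have hc : ((seed.length : Int)) ^ (k + 1) = ((seed.length ^ (k + 1) : Nat) : Int) := by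
      push_cast; ring
    rw [hc, Int.toNat_natCast]

-- B's loop invariant: after the iterations the state is (join of the next level, len(seed)^level)
theorem foldB (seed : List String) (ns : List Int) : ∀ (k : Nat),
    (ns.foldl
      (fun (st : String × Int) _ =>
        (PySem.Str.join "" (seed.map (fun e => if e == "L" then st.1
            else String.ofList (List.replicate st.2.toNat 'G'))), st.2 * (seed.length : Int)))
      (PySem.Str.join "" (lvl seed (k + 1)), ((seed.length : Int)) ^ (k + 1)))
    = (PySem.Str.join "" (lvl seed (ns.length + k + 1)), ((seed.length : Int)) ^ (ns.length + k + 1)) := by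
  induction ns with
  | nil => intro k; simp
  | cons a t ih =>
      intro k
      rw [List.foldl_cons]
      have h1 : ((seed.length : Int)) ^ (k + 1) * (seed.length : Int)
          = ((seed.length : Int)) ^ (k + 2) := by
        ring
      rw [stepB_eq, h1, ih (k + 1)]
      simp only [List.length_cons]
      rw [show t.length + (k + 1) + 1 = t.length + 1 + k + 1 from by omega]

theorem inflate_alt_eq (seed : List String) (C : Int) :
    inflate_alt seed C = inflate seed C := by
  rw [inflate_eq_lvl]
  by_cases hC : C ≤ 0
  · have h0 : C.toNat = 0 := Int.toNat_of_nonpos hC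
    rw [inflate_alt, if_pos hC, h0]
    symm
    apply String.toList_inj.mp
    rw [show lvl seed 0 = ["L"] from rfl, toList_join_nil]
    simp
  · rw [inflate_alt, if_neg hC]
    simp only [PySem.List.len_eq]
    have hB := foldB seed (PySem.List.pyRange 0 (C - 1) 1) 0
    rw [show (0 : Nat) + 1 = 1 from rfl, lvl_one, pow_one,
      show (PySem.List.pyRange 0 (C - 1) 1).length = (C - 1).toNat from by
        simp [PySem.List.pyRange_one]] at hB
    rw [hB]
    rw [show (C - 1).toNat + 0 + 1 = C.toNat from by omega]

-- ===== VERDICT (by name: the statement is the Claim_ definition above) =====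
theorem inflate_spec : Claim_equal_inflate := by
  intro seed C _
  unfold Spec_inflate
  exact (inflate_alt_eq seed C).symm
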